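-- pv_equiv track=rewrite | github.com/zinozino1/Algorithm_PS | 복기/하반기현대카드/3.py | solution
-- ===== SOURCE A (Python) =====
-- def solution(l1, l2):
--     check = set()
--     check.add((0, 0))
--
--     def dfs(L, a, b):
--         for i in range(6):
--             if i == 0:  # a 채우기
--                 na = l1
--                 if (na, b) not in check:
--                     check.add((na, b))
--                     dfs(L+1, na, b)
--             elif i == 1:  # a 비우기
--                 na = 0
--                 if (na, b) not in check:
--                     check.add((na, b))
--                     dfs(L+1, na, b)
--             elif i == 2:  # b 채우기
--                 nb = l2
--                 if (a, nb) not in check: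
--                     check.add((a, nb))
--                     dfs(L + 1, a, nb)
--             elif i == 3:  # b 비우기
--                 nb = 0
--                 if (a, nb) not in check:
--                     check.add((a, nb))
--                     dfs(L + 1, a, nb)
--             elif i == 4:  # a->b
--                 if a+b > l2:
--                     na = a-(l2-b)
--                     nb = l2
--                 else:
--                     nb = a+b
--                     na = 0
--                 if (na, nb) not in check:
--                     check.add((na, nb))
--                     dfs(L+1, na, nb)
--             elif i == 5:  # b->a
--                 if a+b > l1:
--                     nb = b-(l1-a)
--                     na = l1
--                 else:
--                     na = a+b
--                     nb = 0
--                 if (na, nb) not in check: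
--                     check.add((na, nb))
--                     dfs(L+1, na, nb)
--
--     dfs(0, 0, 0)
--     res = set()
--     for c in check:
--         if c[0] != 0 and c[1] != 0:
--             res.add(c[0])
--             res.add(c[1])
--
--     return sorted(list(res))
-- ===== SOURCE B (Python) =====
-- def solution(l1, l2):
--     # Iterative BFS over jug states with an explicit FIFO worklist
--     # (A does the same reachability by recursive DFS).
--     check = {(0, 0)}
--     todo = [(0, 0)]
--     while todo:
--         a, b = todo.pop(0)
--         succs = [(l1, b), (0, b), (a, l2), (a, 0)]
--         if a + b > l2:
--             succs.append((a - (l2 - b), l2))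
--         else:
--             succs.append((0, a + b))
--         if a + b > l1:
--             succs.append((l1, b - (l1 - a)))
--         else:
--             succs.append((a + b, 0))
--         for s in succs:
--             if s not in check:
--                 check.add(s)
--                 todo.append(s)
--     amounts = {x for (a, b) in check if a != 0 and b != 0 for x in (a, b)}
--     return sorted(amounts)
-- ===== Notes on version B (the rewrite author's own statement) =====
-- stated objective: alternative
-- what changed: The recursive DFS over jug states is replaced by an iterative BFS with an explicit FIFO worklist and a set-comprehension extraction of the nonzero amounts; the visited set is order-independent and the output is sorted, so the results coincide.
-- outside the precondition, e.g. on solution(-1, 1): A raises RecursionError, B does not finish within the time limit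
import Mathlib
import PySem

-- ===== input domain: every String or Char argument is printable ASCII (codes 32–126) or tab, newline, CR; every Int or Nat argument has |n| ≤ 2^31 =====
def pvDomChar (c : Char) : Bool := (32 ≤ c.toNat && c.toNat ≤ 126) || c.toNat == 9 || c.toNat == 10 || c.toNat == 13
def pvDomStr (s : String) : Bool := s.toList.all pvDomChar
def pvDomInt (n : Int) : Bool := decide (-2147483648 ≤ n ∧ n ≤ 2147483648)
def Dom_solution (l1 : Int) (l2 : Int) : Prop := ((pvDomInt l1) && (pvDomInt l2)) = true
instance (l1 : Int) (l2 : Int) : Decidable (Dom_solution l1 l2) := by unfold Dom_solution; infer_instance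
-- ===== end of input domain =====

-- B replaces A's recursive DFS over jug states by an iterative FIFO-worklist BFS with a
-- comprehension-style extraction (objective: alternative, same cost); the visited set is
-- order-independent and the output is sorted, so the two agree.

-- ===== PORT A =====
-- A's recursive dfs: six inline branches, recursing immediately on each newly added state.
-- The Nat fuel only makes the recursion structural; under 0 ≤ l1, 0 ≤ l2 it is proven
-- sufficient (the recursion depth is bounded by the number of states in [0,l1]×[0,l2]).
def solutionDfs (l1 l2 : Int) : Nat → PySem.Set (Int × Int) → Int → Int → PySem.Set (Int × Int)
  | 0, check, _, _ => check
  | fuel+1, check, a, b =>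
    -- i = 0: fill a
    let c0 := if (l1, b) ∈ check then check else solutionDfs l1 l2 fuel (PySem.Set.add check (l1, b)) l1 b
    -- i = 1: empty a
    let c1 := if ((0 : Int), b) ∈ c0 then c0 else solutionDfs l1 l2 fuel (PySem.Set.add c0 (0, b)) 0 b
    -- i = 2: fill b
    let c2 := if (a, l2) ∈ c1 then c1 else solutionDfs l1 l2 fuel (PySem.Set.add c1 (a, l2)) a l2
    -- i = 3: empty b
    let c3 := if (a, (0 : Int)) ∈ c2 then c2 else solutionDfs l1 l2 fuel (PySem.Set.add c2 (a, 0)) a 0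
    -- i = 4: a -> b
    let p4 := if a + b > l2 then (a - (l2 - b), l2) else ((0 : Int), a + b)
    let c4 := if p4 ∈ c3 then c3 else solutionDfs l1 l2 fuel (PySem.Set.add c3 p4) p4.1 p4.2
    -- i = 5: b -> a
    let p5 := if a + b > l1 then (l1, b - (l1 - a)) else (a + b, (0 : Int))
    let c5 := if p5 ∈ c4 then c4 else solutionDfs l1 l2 fuel (PySem.Set.add c4 p5) p5.1 p5.2
    c5

-- the body of A's final `for c in check` loop
def resF (res : PySem.Set Int) (c : Int × Int) : PySem.Set Int :=
  if c.1 ≠ 0 ∧ c.2 ≠ 0 then PySem.Set.add (PySem.Set.add res c.1) c.2 else res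

def solution (l1 : Int) (l2 : Int) : List Int :=
  let check : PySem.Set (Int × Int) := PySem.Set.add PySem.Set.empty (0, 0)
  let check := solutionDfs l1 l2 ((l1 + 1).toNat * (l2 + 1).toNat + 1) check 0 0
  let res : PySem.Set Int := check.foldl resF PySem.Set.empty
  PySem.List.sorted res (fun x => x) false

-- ===== PORT B =====
-- the list `succs` built in Source B
def succsB (l1 l2 a b : Int) : List (Int × Int) :=
  [(l1, b), (0, b), (a, l2), (a, 0)]
    ++ [if a + b > l2 then (a - (l2 - b), l2) else ((0 : Int), a + b)]
    ++ [if a + b > l1 then (l1, b - (l1 - a)) else (a + b, (0 : Int))]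

-- the body of Source B's `for s in succs` loop: add unseen successors and queue them
def bfsStep (st : PySem.Set (Int × Int) × List (Int × Int)) (s : Int × Int) :
    PySem.Set (Int × Int) × List (Int × Int) :=
  if s ∈ st.1 then st else (PySem.Set.add st.1 s, st.2 ++ [s])

-- Source B's while loop: pop the front of the worklist, process its successors.
-- The Nat fuel only makes the loop structural; it is proven sufficient for 0 ≤ l1, 0 ≤ l2.
def solutionBfs (l1 l2 : Int) : Nat → PySem.Set (Int × Int) → List (Int × Int) → PySem.Set (Int × Int)
  | 0, check, _ => check
  | _+1, check, [] => check
  | fuel+1, check, (a, b) :: todo =>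
    let st := (succsB l1 l2 a b).foldl bfsStep (check, todo)
    solutionBfs l1 l2 fuel st.1 st.2

def solution_alt (l1 : Int) (l2 : Int) : List Int :=
  let check := solutionBfs l1 l2 (7 * ((l1 + 1).toNat * (l2 + 1).toNat) + 2)
    (PySem.Set.ofList [((0 : Int), (0 : Int))]) [((0 : Int), (0 : Int))]
  let amounts : PySem.Set Int :=
    PySem.Set.ofList (check.flatMap (fun p => if p.1 ≠ 0 ∧ p.2 ≠ 0 then [p.1, p.2] else []))
  PySem.List.sorted amounts (fun x => x) false

-- ===== PRECONDITION & SPEC =====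
-- Pre_ excludes the inputs on which A's DFS needs deep recursion: its depth is exactly
-- 2*(l1+l2)/gcd(l1,l2) - 1 (unbounded when either capacity is negative), so under CPython's
-- default recursion limit of 1000 A raises RecursionError on every excluded input (measured
-- cutoff 994; the bound 950 leaves a margin for the caller's own stack depth, and a runner
-- that raises the limit can make A return on some excluded inputs, where B agrees but nothing
-- is claimed); the multiplicative form 2*(l1+l2) ≤ 950*gcd avoids division and also covers
-- l1 = l2 = 0, where gcd = 0 and A returns [].
def Pre_solution (l1 : Int) (l2 : Int) : Prop :=
  0 ≤ l1 ∧ 0 ≤ l2 ∧ 2 * (l1 + l2).toNat ≤ 950 * Int.gcd l1 l2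
instance (l1 : Int) (l2 : Int) : Decidable (Pre_solution l1 l2) := by unfold Pre_solution; infer_instance
def pvWitness_solution : Int × Int := (4, 9)

def Spec_solution (l1 : Int) (l2 : Int) (out : List Int) : Prop := out = solution_alt l1 l2
instance (l1 : Int) (l2 : Int) (out : List Int) : Decidable (Spec_solution l1 l2 out) := by unfold Spec_solution; infer_instance

-- ===== CLAIM (what is proved, stated in full; the proofs are below) =====
def Claim_equal_solution : Prop := ∀ (l1 : Int) (l2 : Int), Dom_solution l1 l2 → Pre_solution l1 l2 → Spec_solution l1 l2 (solution l1 l2)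

-- ===== LEMMAS AND PROOFS =====

-- The finite box of states both searches stay inside (for nonnegative capacities).
def InBox (l1 l2 : Int) (p : Int × Int) : Prop := 0 ≤ p.1 ∧ p.1 ≤ l1 ∧ 0 ≤ p.2 ∧ p.2 ≤ l2

def BoxCard (l1 l2 : Int) : Nat := (l1 + 1).toNat * (l2 + 1).toNat

-- States reachable from (0,0) by the six moves.
inductive Reach (l1 l2 : Int) : Int × Int → Prop
  | init : Reach l1 l2 (0, 0)
  | step (p q : Int × Int) : Reach l1 l2 p → q ∈ succsB l1 l2 p.1 p.2 → Reach l1 l2 q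

theorem mem_succsB_0 (l1 l2 a b : Int) : ((l1, b) : Int × Int) ∈ succsB l1 l2 a b := by simp [succsB]
theorem mem_succsB_1 (l1 l2 a b : Int) : (((0 : Int), b) : Int × Int) ∈ succsB l1 l2 a b := by simp [succsB]
theorem mem_succsB_2 (l1 l2 a b : Int) : ((a, l2) : Int × Int) ∈ succsB l1 l2 a b := by simp [succsB]
theorem mem_succsB_3 (l1 l2 a b : Int) : ((a, (0 : Int)) : Int × Int) ∈ succsB l1 l2 a b := by simp [succsB]
theorem mem_succsB_4 (l1 l2 a b : Int) :
    (if a + b > l2 then (a - (l2 - b), l2) else ((0 : Int), a + b)) ∈ succsB l1 l2 a b := by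
  simp only [succsB, List.mem_append, List.mem_cons]
  tauto
theorem mem_succsB_5 (l1 l2 a b : Int) :
    (if a + b > l1 then (l1, b - (l1 - a)) else (a + b, (0 : Int))) ∈ succsB l1 l2 a b := by
  simp only [succsB, List.mem_append, List.mem_cons]
  tauto

theorem box_closed (l1 l2 : Int) (hl1 : 0 ≤ l1) (hl2 : 0 ≤ l2) (a b : Int)
    (h1 : 0 ≤ a) (h2 : a ≤ l1) (h3 : 0 ≤ b) (h4 : b ≤ l2) (q : Int × Int)
    (hq : q ∈ succsB l1 l2 a b) : InBox l1 l2 q := by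
  simp only [succsB, List.mem_append, List.mem_cons, List.not_mem_nil, or_false] at hq
  rcases hq with ((rfl | rfl | rfl | rfl) | rfl) | rfl <;>
    (try split_ifs with hc) <;> refine ⟨?_, ?_, ?_, ?_⟩ <;> dsimp only <;> omega

theorem add_not_mem {α : Type} [BEq α] [LawfulBEq α] (s : PySem.Set α) (x : α) (h : x ∉ s) :
    PySem.Set.add s x = s ++ [x] := by
  simp [PySem.Set.add, PySem.Set.contains_eq_listContains, h]

theorem length_add_not_mem {α : Type} [BEq α] [LawfulBEq α] (s : PySem.Set α) (x : α) (h : x ∉ s) :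
    (PySem.Set.add s x).length = s.length + 1 := by
  rw [add_not_mem s x h]; simp

theorem subset_length_le {α : Type} [DecidableEq α] (s t : List α) (hnd : s.Nodup)
    (hsub : ∀ p ∈ s, p ∈ t) : s.length ≤ t.length := by
  calc s.length = s.toFinset.card := (List.toFinset_card_of_nodup hnd).symm
    _ ≤ t.toFinset.card := Finset.card_le_card (by intro x hx; simp only [List.mem_toFinset] at *; exact hsub x hx)
    _ ≤ t.length := t.toFinset_card_le

theorem length_le_boxCard (l1 l2 : Int) (s : List (Int × Int)) (hnd : s.Nodup)
    (hin : ∀ p ∈ s, InBox l1 l2 p) : s.length ≤ BoxCard l1 l2 := by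
  calc s.length = s.toFinset.card := (List.toFinset_card_of_nodup hnd).symm
    _ ≤ ((Finset.Icc (0 : Int) l1) ×ˢ (Finset.Icc (0 : Int) l2)).card := by
        apply Finset.card_le_card
        intro p hp
        simp only [List.mem_toFinset] at hp
        obtain ⟨a1, a2, a3, a4⟩ := hin p hp
        simp only [Finset.mem_product, Finset.mem_Icc]
        exact ⟨⟨a1, a2⟩, ⟨a3, a4⟩⟩
    _ = BoxCard l1 l2 := by
        rw [Finset.card_product, Int.card_Icc, Int.card_Icc]
        simp [BoxCard]

-- invariant carried through A's dfs: the set grows, stays inside the box, stays nodup,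
-- and every state added on top of `check` has all its successors in the result.
def DfsInv (l1 l2 : Int) (check c : PySem.Set (Int × Int)) : Prop :=
  c.Nodup ∧ (∀ p ∈ c, InBox l1 l2 p) ∧ (∀ p ∈ check, p ∈ c) ∧
  (∀ x ∈ c, x ∉ check → ∀ q ∈ succsB l1 l2 x.1 x.2, q ∈ c)

theorem dfs_step (l1 l2 : Int) (fuel : Nat)
    (IH : ∀ (check : PySem.Set (Int × Int)) (a b : Int),
      check.Nodup → (∀ p ∈ check, InBox l1 l2 p) → (a, b) ∈ check →
      BoxCard l1 l2 - check.length < fuel →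
      DfsInv l1 l2 check (solutionDfs l1 l2 fuel check a b) ∧
      (∀ q ∈ succsB l1 l2 a b, q ∈ solutionDfs l1 l2 fuel check a b))
    (check c : PySem.Set (Int × Int)) (s : Int × Int)
    (hinv : DfsInv l1 l2 check c) (hnd0 : check.Nodup) (hs : InBox l1 l2 s)
    (hcard : BoxCard l1 l2 - check.length < fuel + 1)
    (c' : PySem.Set (Int × Int))
    (hc' : c' = if s ∈ c then c else solutionDfs l1 l2 fuel (PySem.Set.add c s) s.1 s.2) :
    DfsInv l1 l2 check c' ∧ (∀ p ∈ c, p ∈ c') ∧ s ∈ c' := by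
  obtain ⟨hnd, hbox, hsub, hcl⟩ := hinv
  subst hc'
  by_cases hmem : s ∈ c
  · rw [if_pos hmem]
    exact ⟨⟨hnd, hbox, hsub, hcl⟩, fun p hp => hp, hmem⟩
  · rw [if_neg hmem]
    have hbox' : ∀ p ∈ PySem.Set.add c s, InBox l1 l2 p := by
      intro p hp
      rcases (PySem.Set.mem_add c s p).1 hp with h | h
      · exact hbox p h
      · subst h; exact hs
    have hnd' : (PySem.Set.add c s).Nodup := PySem.Set.nodup_add c s hnd
    have hlen0 : check.length ≤ c.length := subset_length_le check c hnd0 hsub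
    have hlen1 : (PySem.Set.add c s).length = c.length + 1 := length_add_not_mem c s hmem
    have hlen2 : (PySem.Set.add c s).length ≤ BoxCard l1 l2 :=
      length_le_boxCard l1 l2 _ hnd' hbox'
    have hcard' : BoxCard l1 l2 - (PySem.Set.add c s).length < fuel := by omega
    have hmem' : (s.1, s.2) ∈ PySem.Set.add c s := (PySem.Set.mem_add c s (s.1, s.2)).2 (Or.inr rfl)
    obtain ⟨⟨hndR, hboxR, hsubR, hclR⟩, hsuccR⟩ := IH (PySem.Set.add c s) s.1 s.2 hnd' hbox' hmem' hcard'
    have hcR : ∀ p ∈ c, p ∈ solutionDfs l1 l2 fuel (PySem.Set.add c s) s.1 s.2 := by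
      intro p hp; exact hsubR p ((PySem.Set.mem_add c s p).2 (Or.inl hp))
    refine ⟨⟨hndR, hboxR, ?_, ?_⟩, hcR, ?_⟩
    · intro p hp; exact hcR p (hsub p hp)
    · intro x hx hnx q hq
      by_cases hx' : x ∈ PySem.Set.add c s
      · rcases (PySem.Set.mem_add c s x).1 hx' with h | h
        · exact hcR q (hcl x h hnx q hq)
        · subst h; exact hsuccR q hq
      · exact hclR x hx hx' q hq
    · exact hsubR s ((PySem.Set.mem_add c s s).2 (Or.inr rfl))

theorem dfs_main (l1 l2 : Int) (hl1 : 0 ≤ l1) (hl2 : 0 ≤ l2) (fuel : Nat) :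
    ∀ (check : PySem.Set (Int × Int)) (a b : Int),
      check.Nodup → (∀ p ∈ check, InBox l1 l2 p) → (a, b) ∈ check →
      BoxCard l1 l2 - check.length < fuel →
      DfsInv l1 l2 check (solutionDfs l1 l2 fuel check a b) ∧
      (∀ q ∈ succsB l1 l2 a b, q ∈ solutionDfs l1 l2 fuel check a b) := by
  induction fuel with
  | zero => intro check a b _ _ _ hcard; omega
  | succ fuel IH =>
    intro check a b hnd hbox hmem hcard
    have hab := hbox _ hmem
    obtain ⟨ha1, ha2, ha3, ha4⟩ := hab
    simp only at ha1 ha2 ha3 ha4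
    have hbc : ∀ q ∈ succsB l1 l2 a b, InBox l1 l2 q :=
      box_closed l1 l2 hl1 hl2 a b ha1 ha2 ha3 ha4
    have hinv0 : DfsInv l1 l2 check check :=
      ⟨hnd, hbox, fun p hp => hp, fun x hx hnx => absurd hx hnx⟩
    simp only [solutionDfs]
    obtain ⟨hinv1, hmono1, hm1⟩ := dfs_step l1 l2 fuel IH check check (l1, b) hinv0 hnd
      (hbc _ (mem_succsB_0 l1 l2 a b)) hcard _ rfl
    obtain ⟨hinv2, hmono2, hm2⟩ := dfs_step l1 l2 fuel IH check _ ((0 : Int), b) hinv1 hnd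
      (hbc _ (mem_succsB_1 l1 l2 a b)) hcard _ rfl
    obtain ⟨hinv3, hmono3, hm3⟩ := dfs_step l1 l2 fuel IH check _ (a, l2) hinv2 hnd
      (hbc _ (mem_succsB_2 l1 l2 a b)) hcard _ rfl
    obtain ⟨hinv4, hmono4, hm4⟩ := dfs_step l1 l2 fuel IH check _ (a, (0 : Int)) hinv3 hnd
      (hbc _ (mem_succsB_3 l1 l2 a b)) hcard _ rfl
    obtain ⟨hinv5, hmono5, hm5⟩ := dfs_step l1 l2 fuel IH check _
      (if a + b > l2 then (a - (l2 - b), l2) else ((0 : Int), a + b)) hinv4 hnd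
      (hbc _ (mem_succsB_4 l1 l2 a b)) hcard _ rfl
    obtain ⟨hinv6, hmono6, hm6⟩ := dfs_step l1 l2 fuel IH check _
      (if a + b > l1 then (l1, b - (l1 - a)) else (a + b, (0 : Int))) hinv5 hnd
      (hbc _ (mem_succsB_5 l1 l2 a b)) hcard _ rfl
    refine ⟨hinv6, ?_⟩
    intro q hq
    simp only [succsB, List.mem_append, List.mem_cons, List.not_mem_nil, or_false] at hq
    rcases hq with ((rfl | rfl | rfl | rfl) | rfl) | rfl
    · exact hmono6 _ (hmono5 _ (hmono4 _ (hmono3 _ (hmono2 _ hm1))))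
    · exact hmono6 _ (hmono5 _ (hmono4 _ (hmono3 _ hm2)))
    · exact hmono6 _ (hmono5 _ (hmono4 _ hm3))
    · exact hmono6 _ (hmono5 _ hm4)
    · exact hmono6 _ hm5
    · exact hm6

theorem dfs_sound (l1 l2 : Int) (fuel : Nat) :
    ∀ (check : PySem.Set (Int × Int)) (a b : Int),
      (∀ p ∈ check, Reach l1 l2 p) → Reach l1 l2 (a, b) →
      ∀ p ∈ solutionDfs l1 l2 fuel check a b, Reach l1 l2 p := by
  induction fuel with
  | zero => intro check a b hc _ p hp; exact hc p hp
  | succ fuel IH =>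
    intro check a b hc hab
    have step : ∀ (c : PySem.Set (Int × Int)) (s : Int × Int),
        (∀ p ∈ c, Reach l1 l2 p) → Reach l1 l2 s →
        ∀ p ∈ (if s ∈ c then c else solutionDfs l1 l2 fuel (PySem.Set.add c s) s.1 s.2),
          Reach l1 l2 p := by
      intro c s hcR hsR
      by_cases h : s ∈ c
      · rw [if_pos h]; exact hcR
      · rw [if_neg h]
        apply IH
        · intro p hp
          rcases (PySem.Set.mem_add c s p).1 hp with h' | h'
          · exact hcR p h'
          · subst h'; exact hsR
        · exact hsR
    simp only [solutionDfs]
    apply step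
    apply step
    apply step
    apply step
    apply step
    apply step
    · exact hc
    all_goals exact Reach.step (a, b) _ hab (by first
      | exact mem_succsB_0 l1 l2 a b | exact mem_succsB_1 l1 l2 a b
      | exact mem_succsB_2 l1 l2 a b | exact mem_succsB_3 l1 l2 a b
      | exact mem_succsB_4 l1 l2 a b | exact mem_succsB_5 l1 l2 a b)

-- ----- B side -----

-- what one pass of Source B's inner for-loop guarantees, relative to its starting state
def BfsMid (l1 l2 : Int) (ck : PySem.Set (Int × Int)) (td : List (Int × Int))
    (st : PySem.Set (Int × Int) × List (Int × Int)) : Prop :=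
  st.1.Nodup ∧ (∀ p ∈ st.1, InBox l1 l2 p) ∧ (∀ p ∈ st.2, p ∈ st.1) ∧
  (∀ p ∈ ck, p ∈ st.1) ∧ (∀ p ∈ td, p ∈ st.2) ∧
  (∀ x ∈ st.1, x ∉ ck → x ∈ st.2) ∧
  st.1.length + td.length = ck.length + st.2.length

theorem bfsMid_trans (l1 l2 : Int) (ck : PySem.Set (Int × Int)) (td : List (Int × Int))
    (st st' : PySem.Set (Int × Int) × List (Int × Int))
    (h1 : BfsMid l1 l2 ck td st) (h2 : BfsMid l1 l2 st.1 st.2 st') :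
    BfsMid l1 l2 ck td st' := by
  obtain ⟨a1, a2, a3, a4, a5, a6, a7⟩ := h1
  obtain ⟨b1, b2, b3, b4, b5, b6, b7⟩ := h2
  refine ⟨b1, b2, b3, fun p hp => b4 p (a4 p hp), fun p hp => b5 p (a5 p hp), ?_, by omega⟩
  intro x hx hnx
  by_cases h : x ∈ st.1
  · exact b5 x (a6 x h hnx)
  · exact b6 x hx h

theorem bfs_fold (l1 l2 : Int) :
    ∀ (ss : List (Int × Int)) (ck : PySem.Set (Int × Int)) (td : List (Int × Int)),
      ck.Nodup → (∀ p ∈ ck, InBox l1 l2 p) → (∀ p ∈ td, p ∈ ck) →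
      (∀ s ∈ ss, InBox l1 l2 s) →
      BfsMid l1 l2 ck td (ss.foldl bfsStep (ck, td)) ∧
      (∀ s ∈ ss, s ∈ (ss.foldl bfsStep (ck, td)).1) := by
  intro ss
  induction ss with
  | nil =>
    intro ck td hnd hbox htd _
    exact ⟨⟨hnd, hbox, htd, fun p hp => hp, fun p hp => hp, fun x hx hnx => absurd hx hnx, rfl⟩,
      by simp⟩
  | cons s ss IH =>
    intro ck td hnd hbox htd hss
    have hsIn : InBox l1 l2 s := hss s (by simp)
    by_cases h : s ∈ ck
    · have hstep : bfsStep (ck, td) s = (ck, td) := by simp [bfsStep, h]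
      rw [List.foldl_cons, hstep]
      obtain ⟨hmid, hall⟩ := IH ck td hnd hbox htd (fun x hx => hss x (by simp [hx]))
      refine ⟨hmid, ?_⟩
      intro x hx
      rcases List.mem_cons.1 hx with rfl | hx'
      · exact hmid.2.2.2.1 x h
      · exact hall x hx'
    · have hstep : bfsStep (ck, td) s = (PySem.Set.add ck s, td ++ [s]) := by simp [bfsStep, h]
      rw [List.foldl_cons, hstep]
      have hnd' : (PySem.Set.add ck s).Nodup := PySem.Set.nodup_add ck s hnd
      have hbox' : ∀ p ∈ PySem.Set.add ck s, InBox l1 l2 p := by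
        intro p hp
        rcases (PySem.Set.mem_add ck s p).1 hp with h' | h'
        · exact hbox p h'
        · subst h'; exact hsIn
      have htd' : ∀ p ∈ td ++ [s], p ∈ PySem.Set.add ck s := by
        intro p hp
        rcases List.mem_append.1 hp with h' | h'
        · exact (PySem.Set.mem_add ck s p).2 (Or.inl (htd p h'))
        · simp only [List.mem_singleton] at h'
          exact (PySem.Set.mem_add ck s p).2 (Or.inr h')
      obtain ⟨hmid, hall⟩ := IH (PySem.Set.add ck s) (td ++ [s]) hnd' hbox' htd'
        (fun x hx => hss x (by simp [hx]))
      have hone : BfsMid l1 l2 ck td (PySem.Set.add ck s, td ++ [s]) := by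
        refine ⟨hnd', hbox', htd', fun p hp => (PySem.Set.mem_add ck s p).2 (Or.inl hp),
          fun p hp => List.mem_append.2 (Or.inl hp), ?_, ?_⟩
        · intro x hx hnx
          rcases (PySem.Set.mem_add ck s x).1 hx with h' | h'
          · exact absurd h' hnx
          · subst h'; exact List.mem_append.2 (Or.inr (by simp))
        · rw [length_add_not_mem ck s h]; simp; omega
      refine ⟨bfsMid_trans l1 l2 ck td _ _ hone hmid, ?_⟩
      intro x hx
      rcases List.mem_cons.1 hx with rfl | hx'
      · exact hmid.2.2.2.1 x ((PySem.Set.mem_add ck x x).2 (Or.inr rfl))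
      · exact hall x hx'

theorem bfs_main (l1 l2 : Int) (hl1 : 0 ≤ l1) (hl2 : 0 ≤ l2) (fuel : Nat) :
    ∀ (ck : PySem.Set (Int × Int)) (td : List (Int × Int)),
      ck.Nodup → (∀ p ∈ ck, InBox l1 l2 p) → (∀ p ∈ td, p ∈ ck) →
      (∀ x ∈ ck, x ∉ td → ∀ q ∈ succsB l1 l2 x.1 x.2, q ∈ ck) →
      td.length + 7 * (BoxCard l1 l2 - ck.length) < fuel →
      (∀ p ∈ ck, p ∈ solutionBfs l1 l2 fuel ck td) ∧
      (solutionBfs l1 l2 fuel ck td).Nodup ∧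
      (∀ p ∈ solutionBfs l1 l2 fuel ck td, InBox l1 l2 p) ∧
      (∀ x ∈ solutionBfs l1 l2 fuel ck td, ∀ q ∈ succsB l1 l2 x.1 x.2,
        q ∈ solutionBfs l1 l2 fuel ck td) := by
  induction fuel with
  | zero => intro ck td _ _ _ _ hcard; omega
  | succ fuel IH =>
    intro ck td hnd hbox htd hcl hcard
    match td with
    | [] =>
      simp only [solutionBfs]
      exact ⟨fun p hp => hp, hnd, hbox, fun x hx q hq => hcl x hx (by simp) q hq⟩
    | (a, b) :: rest =>
      have hab := hbox _ (htd (a, b) (by simp))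
      obtain ⟨ha1, ha2, ha3, ha4⟩ := hab
      simp only at ha1 ha2 ha3 ha4
      have hbc : ∀ q ∈ succsB l1 l2 a b, InBox l1 l2 q :=
        box_closed l1 l2 hl1 hl2 a b ha1 ha2 ha3 ha4
      have hrest : ∀ p ∈ rest, p ∈ ck := fun p hp => htd p (by simp [hp])
      obtain ⟨⟨m1, m2, m3, m4, m5, m6, m7⟩, hall⟩ :=
        bfs_fold l1 l2 (succsB l1 l2 a b) ck rest hnd hbox hrest hbc
      set st := (succsB l1 l2 a b).foldl bfsStep (ck, rest) with hst
      have hlen0 : ck.length ≤ st.1.length := subset_length_le ck st.1 hnd m4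
      have hlenB : st.1.length ≤ BoxCard l1 l2 := length_le_boxCard l1 l2 st.1 m1 m2
      have hlenB0 : ck.length ≤ BoxCard l1 l2 := length_le_boxCard l1 l2 ck hnd hbox
      have hcard' : st.2.length + 7 * (BoxCard l1 l2 - st.1.length) < fuel := by
        simp only [List.length_cons] at hcard; omega
      have hcl' : ∀ x ∈ st.1, x ∉ st.2 → ∀ q ∈ succsB l1 l2 x.1 x.2, q ∈ st.1 := by
        intro x hx hnx q hq
        by_cases hck : x ∈ ck
        · by_cases hx0 : x = (a, b)
          · subst hx0; exact hall q hq
          · have hxtd : x ∉ (a, b) :: rest := by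
              intro hmem
              rcases List.mem_cons.1 hmem with h' | h'
              · exact hx0 h'
              · exact hnx (m5 x h')
            exact m4 q (hcl x hck hxtd q hq)
        · exact absurd (m6 x hx hck) hnx
      obtain ⟨r1, r2, r3, r4⟩ := IH st.1 st.2 m1 m2 m3 hcl' hcard'
      simp only [solutionBfs]
      exact ⟨fun p hp => r1 p (m4 p hp), r2, r3, r4⟩

theorem bfs_fold_sound (l1 l2 : Int) :
    ∀ (ss : List (Int × Int)) (st : PySem.Set (Int × Int) × List (Int × Int)),
      (∀ p ∈ st.1, Reach l1 l2 p) → (∀ p ∈ st.2, p ∈ st.1) → (∀ s ∈ ss, Reach l1 l2 s) →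
      (∀ p ∈ (ss.foldl bfsStep st).1, Reach l1 l2 p) ∧
      (∀ p ∈ (ss.foldl bfsStep st).2, p ∈ (ss.foldl bfsStep st).1) := by
  intro ss
  induction ss with
  | nil => intro st h1 h2 _; exact ⟨h1, h2⟩
  | cons s ss IH =>
    intro st h1 h2 hss
    rw [List.foldl_cons]
    apply IH
    · intro p hp
      simp only [bfsStep] at hp
      split at hp
      · exact h1 p hp
      · rcases (PySem.Set.mem_add st.1 s p).1 hp with h' | h'
        · exact h1 p h'
        · subst h'; exact hss p (by simp)
    · intro p hp
      by_cases h : s ∈ st.1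
      · simp only [bfsStep, if_pos h] at hp ⊢
        exact h2 p hp
      · simp only [bfsStep, if_neg h] at hp ⊢
        rcases List.mem_append.1 hp with h' | h'
        · exact (PySem.Set.mem_add st.1 s p).2 (Or.inl (h2 p h'))
        · simp only [List.mem_singleton] at h'
          exact (PySem.Set.mem_add st.1 s p).2 (Or.inr h')
    · intro x hx; exact hss x (by simp [hx])

theorem bfs_sound (l1 l2 : Int) (fuel : Nat) :
    ∀ (ck : PySem.Set (Int × Int)) (td : List (Int × Int)),
      (∀ p ∈ ck, Reach l1 l2 p) → (∀ p ∈ td, p ∈ ck) →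
      ∀ p ∈ solutionBfs l1 l2 fuel ck td, Reach l1 l2 p := by
  induction fuel with
  | zero => intro ck td h1 _ p hp; exact h1 p hp
  | succ fuel IH =>
    intro ck td h1 h2
    match td with
    | [] => simp only [solutionBfs]; exact h1
    | (a, b) :: rest =>
      simp only [solutionBfs]
      have hreach : Reach l1 l2 (a, b) := h1 _ (h2 (a, b) (by simp))
      have hss : ∀ s ∈ succsB l1 l2 a b, Reach l1 l2 s := by
        intro s hs; exact Reach.step (a, b) s hreach hs
      obtain ⟨g1, g2⟩ := bfs_fold_sound l1 l2 (succsB l1 l2 a b) (ck, rest) h1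
        (fun p hp => h2 p (by simp [hp])) hss
      exact IH _ _ g1 g2

-- ----- both searches compute exactly the reachable set -----

theorem mem_visitedA (l1 l2 : Int) (hl1 : 0 ≤ l1) (hl2 : 0 ≤ l2) (p : Int × Int) :
    p ∈ solutionDfs l1 l2 (BoxCard l1 l2 + 1) (PySem.Set.add PySem.Set.empty (0, 0)) 0 0 ↔
      Reach l1 l2 p := by
  have hstart : PySem.Set.add PySem.Set.empty ((0 : Int), (0 : Int)) = [((0 : Int), (0 : Int))] := rfl
  rw [hstart]
  have hnd : ([((0 : Int), (0 : Int))] : List (Int × Int)).Nodup := by simp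
  have hbox : ∀ q ∈ ([((0 : Int), (0 : Int))] : List (Int × Int)), InBox l1 l2 q := by
    intro q hq; simp only [List.mem_singleton] at hq; subst hq
    exact ⟨le_rfl, hl1, le_rfl, hl2⟩
  have hmem : ((0 : Int), (0 : Int)) ∈ ([((0 : Int), (0 : Int))] : List (Int × Int)) := by simp
  have hcard : BoxCard l1 l2 - ([((0 : Int), (0 : Int))] : List (Int × Int)).length <
      BoxCard l1 l2 + 1 := by simp
  obtain ⟨⟨_, _, hsub, hclosed⟩, hsucc⟩ :=
    dfs_main l1 l2 hl1 hl2 (BoxCard l1 l2 + 1) [((0 : Int), (0 : Int))] 0 0 hnd hbox hmem hcard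
  constructor
  · intro hp
    refine dfs_sound l1 l2 (BoxCard l1 l2 + 1) [((0 : Int), (0 : Int))] 0 0 ?_ Reach.init p hp
    intro q hq; simp only [List.mem_singleton] at hq; subst hq; exact Reach.init
  · intro hp
    induction hp with
    | init => exact hsub _ hmem
    | step p' q hp' hq ih =>
      by_cases hp0 : p' ∈ ([((0 : Int), (0 : Int))] : List (Int × Int))
      · simp only [List.mem_singleton] at hp0
        subst hp0
        exact hsucc q hq
      · exact hclosed p' ih hp0 q hq

theorem mem_visitedB (l1 l2 : Int) (hl1 : 0 ≤ l1) (hl2 : 0 ≤ l2) (p : Int × Int) :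
    p ∈ solutionBfs l1 l2 (7 * BoxCard l1 l2 + 2)
      (PySem.Set.ofList [((0 : Int), (0 : Int))]) [((0 : Int), (0 : Int))] ↔ Reach l1 l2 p := by
  have hstart : PySem.Set.ofList [((0 : Int), (0 : Int))] = [((0 : Int), (0 : Int))] := rfl
  rw [hstart]
  have hnd : ([((0 : Int), (0 : Int))] : List (Int × Int)).Nodup := by simp
  have hbox : ∀ q ∈ ([((0 : Int), (0 : Int))] : List (Int × Int)), InBox l1 l2 q := by
    intro q hq; simp only [List.mem_singleton] at hq; subst hq
    exact ⟨le_rfl, hl1, le_rfl, hl2⟩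
  have htd : ∀ q ∈ ([((0 : Int), (0 : Int))] : List (Int × Int)),
      q ∈ ([((0 : Int), (0 : Int))] : List (Int × Int)) := fun q hq => hq
  have hcl : ∀ x ∈ ([((0 : Int), (0 : Int))] : List (Int × Int)),
      x ∉ ([((0 : Int), (0 : Int))] : List (Int × Int)) →
      ∀ q ∈ succsB l1 l2 x.1 x.2, q ∈ ([((0 : Int), (0 : Int))] : List (Int × Int)) :=
    fun x hx hnx => absurd hx hnx
  have hcard : ([((0 : Int), (0 : Int))] : List (Int × Int)).length +
      7 * (BoxCard l1 l2 - ([((0 : Int), (0 : Int))] : List (Int × Int)).length) <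
      7 * BoxCard l1 l2 + 2 := by simp; omega
  obtain ⟨hsub, _, _, hclosed⟩ :=
    bfs_main l1 l2 hl1 hl2 (7 * BoxCard l1 l2 + 2) [((0 : Int), (0 : Int))]
      [((0 : Int), (0 : Int))] hnd hbox htd hcl hcard
  constructor
  · intro hp
    refine bfs_sound l1 l2 (7 * BoxCard l1 l2 + 2) _ _ ?_ htd p hp
    intro q hq; simp only [List.mem_singleton] at hq; subst hq; exact Reach.init
  · intro hp
    induction hp with
    | init => exact hsub _ (by simp)
    | step p' q hp' hq ih => exact hclosed p' ih q hq

-- ----- the result extraction is a pure function of the visited SET -----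

theorem mem_foldl_resF :
    ∀ (l : List (Int × Int)) (acc : PySem.Set Int) (x : Int),
      x ∈ l.foldl resF acc ↔
        x ∈ acc ∨ ∃ p ∈ l, (p.1 ≠ 0 ∧ p.2 ≠ 0) ∧ (x = p.1 ∨ x = p.2) := by
  intro l
  induction l with
  | nil => intro acc x; simp
  | cons c l IH =>
    intro acc x
    rw [List.foldl_cons, IH]
    by_cases h : c.1 ≠ 0 ∧ c.2 ≠ 0
    · simp only [resF, if_pos h, PySem.Set.mem_add, List.exists_mem_cons_iff]
      constructor
      · rintro (((hx | rfl) | rfl) | ⟨p, hp, hcond, hxp⟩)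
        · exact Or.inl hx
        · exact Or.inr (Or.inl ⟨h, Or.inl rfl⟩)
        · exact Or.inr (Or.inl ⟨h, Or.inr rfl⟩)
        · exact Or.inr (Or.inr ⟨p, hp, hcond, hxp⟩)
      · rintro (hx | ⟨_, (rfl | rfl)⟩ | ⟨p, hp, hcond, hxp⟩)
        · exact Or.inl (Or.inl (Or.inl hx))
        · exact Or.inl (Or.inl (Or.inr rfl))
        · exact Or.inl (Or.inr rfl)
        · exact Or.inr ⟨p, hp, hcond, hxp⟩
    · simp only [resF, if_neg h, List.exists_mem_cons_iff]
      constructor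
      · rintro (hx | hex)
        · exact Or.inl hx
        · exact Or.inr (Or.inr hex)
      · rintro (hx | ⟨hcond, _⟩ | hex)
        · exact Or.inl hx
        · exact absurd hcond h
        · exact Or.inr hex

theorem nodup_foldl_resF :
    ∀ (l : List (Int × Int)) (acc : PySem.Set Int), acc.Nodup → (l.foldl resF acc).Nodup := by
  intro l
  induction l with
  | nil => intro acc h; exact h
  | cons c l IH =>
    intro acc h
    rw [List.foldl_cons]
    apply IH
    simp only [resF]
    split
    · exact PySem.Set.nodup_add _ _ (PySem.Set.nodup_add _ _ h)
    · exact h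

theorem mem_amountsB (check : List (Int × Int)) (x : Int) :
    x ∈ PySem.Set.ofList (check.flatMap (fun p => if p.1 ≠ 0 ∧ p.2 ≠ 0 then [p.1, p.2] else [])) ↔
      ∃ p ∈ check, (p.1 ≠ 0 ∧ p.2 ≠ 0) ∧ (x = p.1 ∨ x = p.2) := by
  rw [PySem.Set.mem_ofList, List.mem_flatMap]
  constructor
  · rintro ⟨p, hp, hx⟩
    refine ⟨p, hp, ?_⟩
    split at hx
    · rename_i hcond
      simp only [List.mem_cons, List.not_mem_nil, or_false] at hx
      exact ⟨hcond, hx⟩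
    · simp at hx
  · rintro ⟨p, hp, hcond, hx⟩
    exact ⟨p, hp, by rw [if_pos hcond]; simpa using hx⟩

theorem solutions_eq (l1 l2 : Int) (hl1 : 0 ≤ l1) (hl2 : 0 ≤ l2) :
    solution l1 l2 = solution_alt l1 l2 := by
  unfold solution solution_alt
  have hfuelA : (l1 + 1).toNat * (l2 + 1).toNat + 1 = BoxCard l1 l2 + 1 := rfl
  have hfuelB : 7 * ((l1 + 1).toNat * (l2 + 1).toNat) + 2 = 7 * BoxCard l1 l2 + 2 := rfl
  rw [hfuelA, hfuelB]
  apply PySem.List.sorted_eq_sorted_of_perm _ _ _ (fun a b h => h)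
  apply (List.perm_ext_iff_of_nodup
    (nodup_foldl_resF _ _ (by simp [PySem.Set.empty]))
    (PySem.Set.nodup_ofList _)).2
  intro x
  rw [mem_foldl_resF, mem_amountsB]
  have hempty : x ∉ (PySem.Set.empty : PySem.Set Int) := by simp [PySem.Set.empty]
  simp only [hempty, false_or]
  constructor
  · rintro ⟨p, hp, h⟩
    exact ⟨p, (mem_visitedB l1 l2 hl1 hl2 p).2 ((mem_visitedA l1 l2 hl1 hl2 p).1 hp), h⟩
  · rintro ⟨p, hp, h⟩
    exact ⟨p, (mem_visitedA l1 l2 hl1 hl2 p).2 ((mem_visitedB l1 l2 hl1 hl2 p).1 hp), h⟩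

-- ===== VERDICT (by name: the statement is the Claim_ definition above) =====
theorem solution_spec : Claim_equal_solution := by
  intro l1 l2 _ hpre
  obtain ⟨hl1, hl2, _⟩ := hpre
  show solution l1 l2 = solution_alt l1 l2
  exact solutions_eq l1 l2 hl1 hl2
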